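-- pv_equiv track=rewrite | github.com/mdandre89/Codewars-exercises | checking-groups/checking-groups.py | group_check
-- ===== SOURCE A (Python) =====
-- def group_check(s):
--     l = len(s)
--     i=0
--     while i< l:
--         s=s.replace("()","")
--         s=s.replace("[]","")
--         s=s.replace("{}","")
--         i+=1
--     return not bool(len(s))
-- ===== SOURCE B (Python) =====
-- def group_check(s):
--     pairs = {')': '(', ']': '[', '}': '{'}
--     stack = []
--     for c in s:
--         if c in '([{':
--             stack.append(c)
--         elif c in pairs:
--             if not stack or stack.pop() != pairs[c]:
--                 return False
--         else:
--             return False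
--     return not stack
-- ===== Notes on version B (the rewrite author's own statement) =====
-- stated objective: faster
-- what changed: Replaced the repeated string-replace cancellation loop (len(s) full passes, each rebuilding the string) with a single left-to-right scan keeping a stack of open brackets.
import Mathlib
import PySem

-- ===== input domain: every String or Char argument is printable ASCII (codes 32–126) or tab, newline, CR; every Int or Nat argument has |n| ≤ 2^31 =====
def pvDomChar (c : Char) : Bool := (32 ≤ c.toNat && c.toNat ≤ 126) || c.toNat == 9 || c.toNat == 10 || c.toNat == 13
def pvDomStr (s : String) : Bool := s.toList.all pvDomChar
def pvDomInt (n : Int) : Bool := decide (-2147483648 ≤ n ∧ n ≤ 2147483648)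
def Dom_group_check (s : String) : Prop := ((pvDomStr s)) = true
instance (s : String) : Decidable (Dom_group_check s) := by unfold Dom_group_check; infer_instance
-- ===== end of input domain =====

-- B replaces A's quadratic repeated replace("()","")/replace("[]","")/replace("{}","") loop
-- with a single-pass stack matcher (objective: faster); return values proved equal on Dom.


-- ===== PORT A =====
-- the body of one 'while' iteration: s = s.replace("()","") ; s = s.replace("[]","") ; s = s.replace("{}","")
def pvPassA (t : String) : String :=
  PySem.Str.replace (PySem.Str.replace (PySem.Str.replace t "()" "") "[]" "") "{}" ""

def group_check (s : String) : Bool :=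
  let l := PySem.Str.len s
  -- 'i = 0; while i < l: … ; i += 1' runs the body exactly l times (l = len(s) ≥ 0)
  let t := (List.range l.toNat).foldl (fun t _ => pvPassA t) s
  decide (PySem.Str.len t = 0)   -- not bool(len(s))

-- ===== PORT B =====
-- pairs = {')': '(', ']': '[', '}': '{'} (literal dict, ported as a lookup function)
def pvPairs (c : Char) : Option Char :=
  if c = ')' then some '(' else if c = ']' then some '[' else if c = '}' then some '{' else none

-- the for-loop with early returns; stack holds the pending open brackets (top first)
def pvAltGo : List Char → List Char → Bool
  | [], stack => stack.isEmpty
  | c :: rest, stack =>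
    if c = '(' || c = '[' || c = '{' then pvAltGo rest (c :: stack)
    else
      match pvPairs c with
      | some o =>
        match stack with
        | [] => false
        | top :: st => if top = o then pvAltGo rest st else false
      | none => false

def group_check_alt (s : String) : Bool := pvAltGo s.toList []

-- ===== PRECONDITION & SPEC =====
def Spec_group_check (s : String) (out : Bool) : Prop := out = group_check_alt s
instance (s : String) (out : Bool) : Decidable (Spec_group_check s out) := by unfold Spec_group_check; infer_instance

-- ===== CLAIM (what is proved, stated in full; the proofs are below) =====
def Claim_equal_group_check : Prop := ∀ (s : String), Dom_group_check s → Spec_group_check s (group_check s)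

-- ===== LEMMAS AND PROOFS =====

-- one pass of Python's s.replace([o,c], ""): drop non-overlapping occurrences left to right
def pvRem (o c : Char) : List Char → List Char
  | a :: b :: t => if a = o ∧ b = c then pvRem o c t else a :: pvRem o c (b :: t)
  | l => l

theorem pvRem_len (o c : Char) (l : List Char) : (pvRem o c l).length ≤ l.length := by
  induction l using pvRem.induct o c with
  | case1 a b t h ih => rw [pvRem, if_pos h]; simp; omega
  | case2 a b t h ih => rw [pvRem, if_neg h]; simp only [List.length_cons] at ih ⊢; omega
  | case3 l hl =>
    match l, hl with
    | [], _ => simp [pvRem]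
    | [a], _ => simp [pvRem]
    | a :: b :: t, hl => exact (hl a b t rfl).elim

theorem pvRem_eq_or_lt (o c : Char) (l : List Char) :
    pvRem o c l = l ∨ (pvRem o c l).length < l.length := by
  induction l using pvRem.induct o c with
  | case1 a b t h ih =>
    right; rw [pvRem, if_pos h]
    have := pvRem_len o c t; simp only [List.length_cons]; omega
  | case2 a b t h ih =>
    rw [pvRem, if_neg h]
    rcases ih with e | lt
    · left; rw [e]
    · right; simp only [List.length_cons] at lt ⊢; omega
  | case3 l hl =>
    match l, hl with
    | [], _ => left; simp [pvRem]
    | [a], _ => left; simp [pvRem]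
    | a :: b :: t, hl => exact (hl a b t rfl).elim

theorem pvGo_spec (o c : Char) : ∀ (fuel : Nat) (l acc : List Char), l.length ≤ fuel →
    PySem.Chars.replace.go [o, c] [] fuel l acc = acc.reverse ++ pvRem o c l := by
  intro fuel
  induction fuel with
  | zero =>
    intro l acc h
    have : l = [] := by cases l <;> simp_all
    subst this; simp [PySem.Chars.replace.go, pvRem]
  | succ n ih =>
    intro l acc h
    match l with
    | [] => simp [PySem.Chars.replace.go, pvRem]
    | [a] =>
      have hpre : [o, c].isPrefixOf [a] = false := by simp [List.isPrefixOf]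
      simp only [PySem.Chars.replace.go, hpre, Bool.false_eq_true, if_false]
      rw [ih [] (a :: acc) (by simp)]
      simp [pvRem]
    | a :: b :: t =>
      by_cases hoc : a = o ∧ b = c
      · obtain ⟨h1, h2⟩ := hoc; subst h1; subst h2
        have hpre : [a, b].isPrefixOf (a :: b :: t) = true := by simp [List.isPrefixOf]
        simp only [PySem.Chars.replace.go, hpre, if_true]
        rw [show List.drop (List.length [a, b]) (a :: b :: t) = t by simp]
        rw [ih t ([].reverse ++ acc) (by simp only [List.length_cons] at h ⊢; omega)]
        rw [pvRem, if_pos ⟨rfl, rfl⟩]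
        simp
      · have hpre : [o, c].isPrefixOf (a :: b :: t) = false := by
          simp [List.isPrefixOf]; intro h1 h2; exact hoc ⟨h1.symm, h2.symm⟩
        simp only [PySem.Chars.replace.go, hpre, Bool.false_eq_true, if_false]
        rw [ih (b :: t) (a :: acc) (by simp only [List.length_cons] at h ⊢; omega)]
        rw [pvRem, if_neg hoc]
        simp

theorem pvReplace_eq_rem (o c : Char) (l : List Char) :
    PySem.Chars.replace l [o, c] [] = pvRem o c l := by
  simp only [PySem.Chars.replace, List.isEmpty]
  rw [pvGo_spec o c l.length l [] le_rfl]
  simp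

-- no adjacent occurrence of the two-character pattern o,c
def pvNoPair (o c : Char) : List Char → Bool
  | a :: b :: t => !(a = o && b = c) && pvNoPair o c (b :: t)
  | _ => true

theorem pvNoPair_tail (o c a : Char) (l : List Char) (h : pvNoPair o c (a :: l) = true) :
    pvNoPair o c l = true := by
  cases l with
  | nil => simp [pvNoPair]
  | cons b t => simp only [pvNoPair, Bool.and_eq_true] at h; exact h.2

theorem pvRem_fix_noPair (o c : Char) (l : List Char) (h : pvRem o c l = l) :
    pvNoPair o c l = true := by
  induction l using pvRem.induct o c with
  | case1 a b t hoc ih =>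
    exfalso
    rw [pvRem, if_pos hoc] at h
    have h1 := pvRem_len o c t
    have h2 := congrArg List.length h
    simp only [List.length_cons] at h2; omega
  | case2 a b t hoc ih =>
    rw [pvRem, if_neg hoc] at h
    simp only [List.cons.injEq, true_and] at h
    simp only [pvNoPair, Bool.and_eq_true]
    refine ⟨?_, ih h⟩
    simp only [Bool.not_eq_eq_eq_not, Bool.not_true, Bool.and_eq_false_iff,
      decide_eq_false_iff_not]
    by_cases h1 : a = o
    · right; intro h2; exact hoc ⟨h1, h2⟩
    · left; exact h1
  | case3 l hl =>
    match l, hl with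
    | [], _ => simp [pvNoPair]
    | [a], _ => simp [pvNoPair]
    | a :: b :: t, hl => exact (hl a b t rfl).elim

-- the three bracket pairs
def pvIsPair (o c : Char) : Prop :=
  (o = '(' ∧ c = ')') ∨ (o = '[' ∧ c = ']') ∨ (o = '{' ∧ c = '}')

-- an adjacent matching pair cancels against the scan
theorem pvAltGo_pair_cons (o c : Char) (h : pvIsPair o c) (t st : List Char) :
    pvAltGo (o :: c :: t) st = pvAltGo t st := by
  rcases h with ⟨h1, h2⟩ | ⟨h1, h2⟩ | ⟨h1, h2⟩ <;> subst h1 <;> subst h2 <;>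
    simp [pvAltGo, pvPairs]

theorem pvAltGo_rem (o c : Char) (h : pvIsPair o c) (l : List Char) :
    ∀ st, pvAltGo (pvRem o c l) st = pvAltGo l st := by
  induction l using pvRem.induct o c with
  | case1 a b t hoc ih =>
    intro st
    rw [pvRem, if_pos hoc, ih st]
    obtain ⟨h1, h2⟩ := hoc; subst h1; subst h2
    exact (pvAltGo_pair_cons a b h t st).symm
  | case2 a b t hoc ih =>
    intro st
    rw [pvRem, if_neg hoc]
    show pvAltGo (a :: pvRem o c (b :: t)) st = pvAltGo (a :: b :: t) st
    simp only [pvAltGo]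
    by_cases hA : (a = '(' || a = '[' || a = '{') = true
    · rw [if_pos hA, if_pos hA]; exact ih _
    · rw [if_neg hA, if_neg hA]
      cases pvPairs a with
      | none => rfl
      | some o' =>
        cases st with
        | nil => rfl
        | cons top rest =>
          by_cases htop : top = o'
          · simp only [htop, if_true]; exact ih _
          · simp [htop]
  | case3 l hl =>
    match l, hl with
    | [], _ => intro st; simp [pvRem]
    | [a], _ => intro st; simp [pvRem]
    | a :: b :: t, hl => exact (hl a b t rfl).elim

-- a pair-free string that starts with an opener always fails the scan
theorem pvAltGo_open_false (t : List Char) :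
    ∀ (a : Char) (st : List Char),
      (a = '(' ∨ a = '[' ∨ a = '{') →
      pvNoPair '(' ')' (a :: t) = true → pvNoPair '[' ']' (a :: t) = true →
      pvNoPair '{' '}' (a :: t) = true →
      pvAltGo (a :: t) st = false := by
  induction t with
  | nil =>
    intro a st ha _ _ _
    rcases ha with h | h | h <;> subst h <;> simp [pvAltGo]
  | cons b t' ih =>
    intro a st ha h1 h2 h3
    have hopen : (a = '(' || a = '[' || a = '{') = true := by
      rcases ha with h | h | h <;> simp [h]
    rw [show pvAltGo (a :: b :: t') st = pvAltGo (b :: t') (a :: st) by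
      simp [pvAltGo, hopen]]
    by_cases hb : b = '(' ∨ b = '[' ∨ b = '{'
    · exact ih b (a :: st) hb (pvNoPair_tail _ _ _ _ h1) (pvNoPair_tail _ _ _ _ h2)
        (pvNoPair_tail _ _ _ _ h3)
    · push_neg at hb
      obtain ⟨hb1, hb2, hb3⟩ := hb
      have hbo : (b = '(' || b = '[' || b = '{') = false := by simp [hb1, hb2, hb3]
      by_cases e1 : b = ')'
      · subst e1
        simp only [pvNoPair, Bool.and_eq_true, Bool.not_eq_eq_eq_not, Bool.not_true,
          Bool.and_eq_false_iff, decide_eq_false_iff_not] at h1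
        have hne : a ≠ '(' := by
          rcases h1.1 with h | h
          · exact h
          · exact absurd trivial h
        simp [pvAltGo, pvPairs, hne]
      · by_cases e2 : b = ']'
        · subst e2
          simp only [pvNoPair, Bool.and_eq_true, Bool.not_eq_eq_eq_not, Bool.not_true,
            Bool.and_eq_false_iff, decide_eq_false_iff_not] at h2
          have hne : a ≠ '[' := by
            rcases h2.1 with h | h
            · exact h
            · exact absurd trivial h
          simp [pvAltGo, pvPairs, hne]
        · by_cases e3 : b = '}'
          · subst e3
            simp only [pvNoPair, Bool.and_eq_true, Bool.not_eq_eq_eq_not, Bool.not_true,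
              Bool.and_eq_false_iff, decide_eq_false_iff_not] at h3
            have hne : a ≠ '{' := by
              rcases h3.1 with h | h
              · exact h
              · exact absurd trivial h
            simp [pvAltGo, pvPairs, hne]
          · -- b is not a bracket at all
            simp [pvAltGo, pvPairs, hbo, e1, e2, e3]

-- one full pass of A's loop body, on the list side
def pvPassL (t : List Char) : List Char :=
  pvRem '{' '}' (pvRem '[' ']' (pvRem '(' ')' t))

theorem pvPassA_toList (t : String) : (pvPassA t).toList = pvPassL t.toList := by
  simp [pvPassA, PySem.Str.replace, pvPassL,
    show ("()" : String).toList = ['(', ')'] from rfl,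
    show ("[]" : String).toList = ['[', ']'] from rfl,
    show ("{}" : String).toList = ['{', '}'] from rfl,
    show ("" : String).toList = [] from rfl,
    pvReplace_eq_rem]

theorem pvPassL_eq_or_lt (t : List Char) :
    pvPassL t = t ∨ (pvPassL t).length < t.length := by
  unfold pvPassL
  rcases pvRem_eq_or_lt '(' ')' t with e1 | l1
  · rw [e1]
    rcases pvRem_eq_or_lt '[' ']' t with e2 | l2
    · rw [e2]; exact pvRem_eq_or_lt '{' '}' t
    · right; have := pvRem_len '{' '}' (pvRem '[' ']' t); omega
  · right
    have h2 := pvRem_len '[' ']' (pvRem '(' ')' t)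
    have h3 := pvRem_len '{' '}' (pvRem '[' ']' (pvRem '(' ')' t))
    omega

theorem pvPassL_fix_noPairs (t : List Char) (h : pvPassL t = t) :
    pvNoPair '(' ')' t = true ∧ pvNoPair '[' ']' t = true ∧ pvNoPair '{' '}' t = true := by
  have hl1 := pvRem_len '(' ')' t
  have hl2 := pvRem_len '[' ']' (pvRem '(' ')' t)
  have hl3 := pvRem_len '{' '}' (pvRem '[' ']' (pvRem '(' ')' t))
  have hlen := congrArg List.length h
  unfold pvPassL at hlen
  have e1 : pvRem '(' ')' t = t := by
    rcases pvRem_eq_or_lt '(' ')' t with e | l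
    · exact e
    · omega
  rw [e1] at hl2 hl3 hlen
  have e2 : pvRem '[' ']' t = t := by
    rcases pvRem_eq_or_lt '[' ']' t with e | l
    · exact e
    · omega
  unfold pvPassL at h
  rw [e1, e2] at h
  exact ⟨pvRem_fix_noPair _ _ _ e1, pvRem_fix_noPair _ _ _ e2, pvRem_fix_noPair _ _ _ h⟩

theorem pvAltGo_passL (t : List Char) (st : List Char) :
    pvAltGo (pvPassL t) st = pvAltGo t st := by
  unfold pvPassL
  rw [pvAltGo_rem '{' '}' (by simp [pvIsPair]) _ st,
    pvAltGo_rem '[' ']' (by simp [pvIsPair]) _ st,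
    pvAltGo_rem '(' ')' (by simp [pvIsPair]) _ st]

-- A's loop, iterated on the list side
def pvIter : Nat → List Char → List Char
  | 0, t => t
  | n + 1, t => pvPassL (pvIter n t)

theorem pvIter_succ' (n : Nat) (t : List Char) :
    pvIter (n + 1) t = pvIter n (pvPassL t) := by
  induction n generalizing t with
  | zero => rfl
  | succ m ih => show pvPassL (pvIter (m + 1) t) = _; rw [ih t]; rfl

theorem pvIter_fixed (n : Nat) (t : List Char) (h : pvPassL t = t) : pvIter n t = t := by
  induction n with
  | zero => rfl
  | succ m ih => show pvPassL (pvIter m t) = t; rw [ih, h]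

theorem pvFoldl_range_toList (n : Nat) (s : String) :
    ((List.range n).foldl (fun t _ => pvPassA t) s).toList = pvIter n s.toList := by
  induction n with
  | zero => rfl
  | succ m ih =>
    rw [List.range_succ, List.foldl_append]
    show (pvPassA _).toList = _
    rw [pvPassA_toList, ih]; rfl

theorem pvFix_after (n : Nat) (t : List Char) (h : t.length ≤ n) :
    pvPassL (pvIter n t) = pvIter n t := by
  induction n generalizing t with
  | zero =>
    have : t = [] := by cases t <;> simp_all
    subst this; rfl
  | succ m ih =>
    by_cases hf : pvPassL t = t
    · rw [pvIter_fixed (m + 1) t hf, hf]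
    · rcases pvPassL_eq_or_lt t with e | l
      · exact absurd e hf
      · rw [pvIter_succ']
        exact ih (pvPassL t) (by omega)

theorem pvAltGo_iter (n : Nat) (t : List Char) (st : List Char) :
    pvAltGo (pvIter n t) st = pvAltGo t st := by
  induction n with
  | zero => rfl
  | succ m ih => show pvAltGo (pvPassL (pvIter m t)) st = _; rw [pvAltGo_passL, ih]

-- ===== VERDICT (by name: the statement is the Claim_ definition above) =====
theorem group_check_spec : Claim_equal_group_check := by
  intro s _
  unfold Spec_group_check group_check group_check_alt
  simp only [PySem.Str.len_eq, Int.toNat_natCast, Nat.cast_eq_zero, pvFoldl_range_toList]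
  have hinv : pvAltGo (pvIter s.toList.length s.toList) [] = pvAltGo s.toList [] :=
    pvAltGo_iter _ _ _
  have hfix : pvPassL (pvIter s.toList.length s.toList) = pvIter s.toList.length s.toList :=
    pvFix_after _ _ le_rfl
  cases hTe : pvIter s.toList.length s.toList with
  | nil =>
    rw [hTe] at hinv
    simpa [pvAltGo] using hinv.symm
  | cons a t' =>
    rw [hTe] at hinv hfix
    obtain ⟨h1, h2, h3⟩ := pvPassL_fix_noPairs _ hfix
    have hfalse : pvAltGo (a :: t') [] = false := by
      by_cases ha : a = '(' ∨ a = '[' ∨ a = '{'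
      · exact pvAltGo_open_false t' a [] ha h1 h2 h3
      · push_neg at ha
        obtain ⟨ha1, ha2, ha3⟩ := ha
        have hbo : (a = '(' || a = '[' || a = '{') = false := by simp [ha1, ha2, ha3]
        simp only [pvAltGo, hbo, Bool.false_eq_true, if_false]
        cases pvPairs a <;> rfl
    rw [hfalse] at hinv
    simp [← hinv]
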